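-- pv_equiv track=rewrite | github.com/jserv/picogui | pgbuild/src/build-dev/PGBuild/XMLUtil.py | formatCommentBlock
-- ===== SOURCE A (Python) =====
-- def formatCommentBlock(text):
--     """Given a block of text, format it into an XML comment, reindenting the
--        text and stripping blank lines from the top and bottom.
--        """
--     # Stick the text we were given in a comment, reindented and with
--     # blank lines stripped from the beginning and end.
--     output = "<!--\n"
--     lines = [line.strip() for line in text.split("\n")]
--     while lines and not lines[0]:
--         del lines[0]
--     while lines and not lines[-1]:
--         del lines[-1]
--     for line in lines:
--         output += "\t%s\n" % line
--     output += "-->\n"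
--     return output
-- ===== SOURCE B (Python) =====
-- def formatCommentBlock(text):
--     s = "\n".join(line.strip() for line in text.split("\n")).strip()
--     if s:
--         body = "".join("\t%s\n" % l for l in s.split("\n"))
--     else:
--         body = ""
--     return "<!--\n" + body + "-->\n"
-- ===== Notes on version B (the rewrite author's own statement) =====
-- stated objective: simpler
-- what changed: B replaces A's two in-place while-loop deletions on a mutable list of lines by a single string-level strip of the joined stripped lines (with an explicit empty-body guard), turning the list maintenance into three string operations.
import Mathlib
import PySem

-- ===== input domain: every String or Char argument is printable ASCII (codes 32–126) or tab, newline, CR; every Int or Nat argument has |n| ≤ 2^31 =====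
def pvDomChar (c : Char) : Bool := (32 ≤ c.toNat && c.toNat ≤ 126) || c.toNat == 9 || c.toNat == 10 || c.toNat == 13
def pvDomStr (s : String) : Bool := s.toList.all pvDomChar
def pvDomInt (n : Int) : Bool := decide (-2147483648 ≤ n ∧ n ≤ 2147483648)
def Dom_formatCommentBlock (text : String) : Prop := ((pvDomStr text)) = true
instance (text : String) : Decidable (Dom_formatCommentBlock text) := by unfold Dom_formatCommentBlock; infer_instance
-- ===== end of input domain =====

-- B replaces A's two in-place while-loop deletions on a mutable line list by one string-level
-- strip of the joined stripped lines (objective: simpler — a shorter, plainer decomposition).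

-- ===== PORT A =====
-- `while lines and not lines[0]: del lines[0]`
def pvDelFront : List (List Char) → List (List Char)
  | [] => []
  | l :: ls => if l.isEmpty then pvDelFront ls else l :: ls

-- `while lines and not lines[-1]: del lines[-1]`
def pvDelBack : List (List Char) → List (List Char)
  | [] => []
  | l :: ls =>
    match pvDelBack ls with
    | [] => if l.isEmpty then [] else [l]
    | r => l :: r

def formatCommentBlock (text : String) : String :=
  let lines := (PySem.Chars.splitOn text.toList ['\n']).map PySem.Chars.strip
  let lines := pvDelBack (pvDelFront lines)
  String.ofList (lines.foldl (fun out line => out ++ ('\t' :: line ++ ['\n'])) "<!--\n".toList ++ "-->\n".toList)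

-- ===== PORT B =====
def formatCommentBlock_alt (text : String) : String :=
  let s := PySem.Chars.strip
    (PySem.Chars.join ['\n'] ((PySem.Chars.splitOn text.toList ['\n']).map PySem.Chars.strip))
  let body := if s.isEmpty then []
    else PySem.Chars.join [] ((PySem.Chars.splitOn s ['\n']).map (fun l => '\t' :: l ++ ['\n']))
  String.ofList ("<!--\n".toList ++ body ++ "-->\n".toList)

-- ===== PRECONDITION & SPEC =====
def Spec_formatCommentBlock (text : String) (out : String) : Prop := out = formatCommentBlock_alt text
instance (text : String) (out : String) : Decidable (Spec_formatCommentBlock text out) := by unfold Spec_formatCommentBlock; infer_instance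

-- ===== CLAIM (what is proved, stated in full; the proofs are below) =====
def Claim_equal_formatCommentBlock : Prop := ∀ (text : String), Dom_formatCommentBlock text → Spec_formatCommentBlock text (formatCommentBlock text)

-- ===== LEMMAS AND PROOFS =====
theorem pv_modifyHead_ext (f g : List Char → List Char) (h : ∀ x, f x = g x)
    (l : List (List Char)) : l.modifyHead f = l.modifyHead g := by
  cases l <;> simp [h]

theorem pv_go_spec (c : Char) (fuel : Nat) (l cur : List Char) (acc2 : List (List Char))
    (h : l.length < fuel) :
    PySem.Chars.splitOn.go [c] fuel l cur acc2 =
      acc2.reverse ++ List.modifyHead (cur.reverse ++ ·) (List.splitOn c l) := by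
  induction fuel generalizing l cur acc2 with
  | zero => omega
  | succ fuel ih =>
    cases l with
    | nil => simp [PySem.Chars.splitOn.go, List.splitOn_nil]
    | cons a rest =>
      rw [PySem.Chars.splitOn.go]
      by_cases hc : a = c
      · subst hc
        simp only [List.isPrefixOf, BEq.rfl, Bool.true_and, if_pos]
        rw [ih _ _ _ (by simpa using Nat.lt_of_succ_lt_succ h)]
        rw [pv_modifyHead_ext (fun x => [].reverse ++ x) id (fun _ => rfl), List.modifyHead_id]
        simp [List.splitOn, List.splitOnP_cons]
      · have hpf : [c].isPrefixOf (a :: rest) = false := by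
          simp [List.isPrefixOf]; intro hh; exact absurd hh.symm hc
        simp only [hpf, Bool.false_eq_true, if_false]
        rw [ih _ _ _ (by simpa using Nat.lt_of_succ_lt_succ h)]
        simp only [List.splitOn, List.splitOnP_cons, beq_iff_eq, hc, if_false,
          List.modifyHead_modifyHead, List.reverse_cons, List.append_assoc]
        exact congrArg _ (pv_modifyHead_ext _ _ (fun x => rfl) _)

theorem pv_splitOn_eq (s : List Char) (c : Char) :
    PySem.Chars.splitOn s [c] = List.splitOn c s := by
  rw [PySem.Chars.splitOn, pv_go_spec c _ s [] [] (by omega)]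
  rw [pv_modifyHead_ext (fun x => [].reverse ++ x) id (fun _ => rfl), List.modifyHead_id]
  simp

theorem pv_not_mem_splitOn (c : Char) (s : List Char) :
    ∀ p ∈ List.splitOn c s, c ∉ p := by
  induction s with
  | nil => simp [List.splitOn_nil]
  | cons a rest ih =>
    simp only [List.splitOn, List.splitOnP_cons] at *
    by_cases hc : a = c
    · simp only [hc, BEq.rfl, if_pos]
      intro p hp
      rcases List.mem_cons.mp hp with hp | hp
      · subst hp; simp
      · exact ih p hp
    · simp only [beq_iff_eq, hc, if_false]
      rcases hsp : List.splitOnP (fun x => x == c) rest with _ | ⟨p0, ps⟩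
      · exact absurd hsp (List.splitOnP_ne_nil _ _)
      · rw [hsp] at ih
        intro p hp
        simp only [List.modifyHead_cons, List.mem_cons] at hp
        rcases hp with hp | hp
        · subst hp
          simp only [List.mem_cons, not_or]
          exact ⟨fun hh => hc hh.symm, ih p0 (by simp)⟩
        · exact ih p (by simp [hp])

theorem pv_rstrip_prefix (l : List Char) : PySem.Chars.rstrip l <+: l := by
  rw [PySem.Chars.rstrip, ← List.reverse_reverse l]
  exact (List.reverse_prefix).mpr (by simpa using List.dropWhile_suffix (l := l.reverse) PySem.Chars.isspace)

theorem pv_lstrip_of_dropWhile (m : List Char) (h : m.dropWhile PySem.Chars.isspace = m) :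
    PySem.Chars.lstrip (PySem.Chars.rstrip m) = PySem.Chars.rstrip m := by
  rw [PySem.Chars.lstrip]
  rcases hr : PySem.Chars.rstrip m with _ | ⟨a, t⟩
  · rfl
  · have hpre : PySem.Chars.rstrip m <+: m := pv_rstrip_prefix m
    rw [hr] at hpre
    have h0 : m.length > 0 := by
      have := hpre.length_le; simp at this ⊢; omega
    have ha : a = m[0] := by
      have := hpre.getElem (i := 0) (by simp)
      simpa using this
    have : ¬ PySem.Chars.isspace m[0] = true := (List.dropWhile_eq_self_iff.mp h) h0
    rw [List.dropWhile_cons, if_neg (by rw [ha]; exact this)]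

theorem pv_rstrip_rstrip (x : List Char) :
    PySem.Chars.rstrip (PySem.Chars.rstrip x) = PySem.Chars.rstrip x := by
  simp [PySem.Chars.rstrip, List.dropWhile_idempotent]

theorem pv_strip_idem (l : List Char) :
    PySem.Chars.strip (PySem.Chars.strip l) = PySem.Chars.strip l := by
  rw [PySem.Chars.strip, PySem.Chars.strip,
    pv_lstrip_of_dropWhile (PySem.Chars.lstrip l) (by simp [PySem.Chars.lstrip, List.dropWhile_idempotent]),
    pv_rstrip_rstrip]

theorem pv_lstrip_of_strip (l : List Char) (h : PySem.Chars.strip l = l) :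
    PySem.Chars.lstrip l = l := by
  have hsuf : PySem.Chars.lstrip l <:+ l := List.dropWhile_suffix _
  apply hsuf.eq_of_length
  have h1 : (PySem.Chars.strip l).length ≤ (PySem.Chars.lstrip l).length := by
    rw [PySem.Chars.strip]
    exact (pv_rstrip_prefix _).length_le
  have h2 := hsuf.length_le
  rw [h] at h1
  omega

theorem pv_rstrip_of_strip (l : List Char) (h : PySem.Chars.strip l = l) :
    PySem.Chars.rstrip l = l := by
  conv_lhs => rw [← pv_lstrip_of_strip l h]
  rw [← PySem.Chars.strip, h]


theorem pv_delFront_eq (ls : List (List Char)) :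
    pvDelFront ls = ls.dropWhile (·.isEmpty) := by
  induction ls with
  | nil => rfl
  | cons l ls ih =>
    rw [pvDelFront, List.dropWhile_cons]
    by_cases hl : l.isEmpty <;> simp [hl, ih]

theorem pv_delBack_eq (ls : List (List Char)) :
    pvDelBack ls = (ls.reverse.dropWhile (·.isEmpty)).reverse := by
  induction ls with
  | nil => rfl
  | cons l ls ih =>
    rw [pvDelBack, List.reverse_cons, List.dropWhile_append]
    rcases hr : pvDelBack ls with _ | ⟨r0, rs⟩
    · have : ls.reverse.dropWhile (·.isEmpty) = [] := by
        rw [ih] at hr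
        simpa using congrArg List.reverse hr
      rw [this]
      simp only [List.isEmpty_nil, if_pos, List.dropWhile_cons, List.dropWhile_nil]
      by_cases hl : l.isEmpty <;> simp [hl]
    · have hne : ls.reverse.dropWhile (·.isEmpty) ≠ [] := by
        rw [ih] at hr
        intro hh; rw [hh] at hr; simp at hr
      rw [if_neg (fun hh => hne (List.isEmpty_iff.mp hh)), List.reverse_append]
      rw [← ih, hr]
      rfl

theorem pv_intercalate_cons_cons (sep l l' : List Char) (ls : List (List Char)) :
    sep.intercalate (l :: l' :: ls) = l ++ sep ++ sep.intercalate (l' :: ls) := by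
  simp [List.intercalate, List.intersperse]

theorem pv_intercalate_snoc (c : Char) (y : List Char) (xs : List (List Char)) (h : xs ≠ []) :
    [c].intercalate (xs ++ [y]) = [c].intercalate xs ++ [c] ++ y := by
  induction xs with
  | nil => exact absurd rfl h
  | cons x xs ih =>
    cases xs with
    | nil => simp [List.intercalate, List.intersperse]
    | cons x' xs' =>
      have ih' := ih (by simp)
      simp only [List.cons_append] at ih' ⊢
      rw [pv_intercalate_cons_cons, ih', pv_intercalate_cons_cons]
      simp

theorem pv_rev_intercalate (c : Char) (ls : List (List Char)) :
    ([c].intercalate ls).reverse = [c].intercalate (ls.reverse.map List.reverse) := by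
  induction ls with
  | nil => rfl
  | cons l ls ih =>
    cases ls with
    | nil => simp [List.intercalate]
    | cons l' ls' =>
      have hY : ((l :: l' :: ls').reverse.map List.reverse) =
          ((l' :: ls').reverse.map List.reverse) ++ [l.reverse] := by simp
      rw [pv_intercalate_cons_cons, hY, pv_intercalate_snoc c _ _ (by simp), ← ih]
      simp

theorem pv_strip_reverse (m : List Char) (h : PySem.Chars.strip m = m) :
    PySem.Chars.strip m.reverse = m.reverse := by
  have hl := pv_lstrip_of_strip m h
  have hr := pv_rstrip_of_strip m h
  have h1 : PySem.Chars.lstrip m.reverse = m.reverse := by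
    rw [PySem.Chars.lstrip]
    rw [PySem.Chars.rstrip] at hr
    have := congrArg List.reverse hr
    simpa using this
  rw [PySem.Chars.strip, h1, PySem.Chars.rstrip, List.reverse_reverse]
  rw [PySem.Chars.lstrip] at hl
  rw [hl]

theorem pv_lstrip_intercalate (ls : List (List Char))
    (h : ∀ l ∈ ls, PySem.Chars.strip l = l) :
    PySem.Chars.lstrip (['\n'].intercalate ls) = ['\n'].intercalate (ls.dropWhile (·.isEmpty)) := by
  induction ls with
  | nil => rfl
  | cons l ls ih =>
    cases ls with
    | nil =>
      by_cases hl : l.isEmpty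
      · have : l = [] := List.isEmpty_iff.mp hl
        subst this
        simp [List.intercalate, PySem.Chars.lstrip]
      · rw [List.dropWhile_cons, if_neg (by simp [hl]), List.intercalate]
        simp only [List.intersperse, List.flatten]
        simpa using pv_lstrip_of_strip l (h l (by simp))
    | cons l' ls' =>
      rw [pv_intercalate_cons_cons, List.dropWhile_cons]
      by_cases hl : l.isEmpty
      · have hle : l = [] := List.isEmpty_iff.mp hl
        subst hle
        rw [if_pos (by simp)]
        rw [← ih (fun x hx => h x (by simp [hx]))]
        rw [PySem.Chars.lstrip, PySem.Chars.lstrip]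
        simp [PySem.Chars.isspace]
      · have hst := pv_lstrip_of_strip l (h l (by simp))
        rcases hll : l with _ | ⟨a, t⟩
        · simp [hll] at hl
        · rw [if_neg (by simp), pv_intercalate_cons_cons]
          rw [PySem.Chars.lstrip]
          have ha : ¬ PySem.Chars.isspace a = true := by
            rw [hll, PySem.Chars.lstrip] at hst
            have := List.dropWhile_eq_self_iff.mp hst
            simpa using this (by simp)
          simp only [List.cons_append, List.append_assoc, List.dropWhile_cons, ha,
            Bool.false_eq_true, if_false]

theorem pv_strip_intercalate (ls : List (List Char))
    (h : ∀ l ∈ ls, PySem.Chars.strip l = l) :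
    PySem.Chars.strip (['\n'].intercalate ls) =
      ['\n'].intercalate (((ls.dropWhile (·.isEmpty)).reverse.dropWhile (·.isEmpty)).reverse) := by
  have hF : ∀ l ∈ ls.dropWhile (·.isEmpty), PySem.Chars.strip l = l :=
    fun l hl => h l ((List.dropWhile_sublist _).mem hl)
  rw [PySem.Chars.strip, pv_lstrip_intercalate ls h]
  rw [show PySem.Chars.rstrip (['\n'].intercalate (ls.dropWhile (·.isEmpty))) =
      (PySem.Chars.lstrip ((['\n'].intercalate (ls.dropWhile (·.isEmpty))).reverse)).reverse from rfl]
  rw [pv_rev_intercalate]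
  rw [pv_lstrip_intercalate _ (by
    intro l hl
    simp only [List.mem_map, List.mem_reverse] at hl
    obtain ⟨m, hm, rfl⟩ := hl
    exact pv_strip_reverse m (hF m hm))]
  rw [List.dropWhile_map, pv_rev_intercalate]
  simp [show ((fun x : List Char => x.isEmpty) ∘ List.reverse) = (fun x : List Char => x.isEmpty)
    from funext fun x => by simp]

theorem pv_strip_sublist (l : List Char) : (PySem.Chars.strip l).Sublist l := by
  rw [PySem.Chars.strip]
  exact ((pv_rstrip_prefix _).sublist).trans (List.dropWhile_sublist _)

theorem pv_join_nil_flatten (ps : List (List Char)) : ([] : List Char).intercalate ps = ps.flatten := by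
  induction ps with
  | nil => rfl
  | cons p ps ih =>
    cases ps with
    | nil => simp [List.intercalate]
    | cons q qs =>
      rw [pv_intercalate_cons_cons, ih]
      simp

theorem pv_main (text : String) :
    (let lines := (PySem.Chars.splitOn text.toList ['\n']).map PySem.Chars.strip
     let lines := pvDelBack (pvDelFront lines)
     String.ofList (lines.foldl (fun out line => out ++ ('\t' :: line ++ ['\n'])) "<!--\n".toList ++ "-->\n".toList)) =
    (let s := PySem.Chars.strip
        (PySem.Chars.join ['\n'] ((PySem.Chars.splitOn text.toList ['\n']).map PySem.Chars.strip))
     let body := if s.isEmpty then []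
       else PySem.Chars.join [] ((PySem.Chars.splitOn s ['\n']).map (fun l => '\t' :: l ++ ['\n']))
     String.ofList ("<!--\n".toList ++ body ++ "-->\n".toList)) := by
  simp only []
  set L := (PySem.Chars.splitOn text.toList ['\n']).map PySem.Chars.strip with hLdef
  have hL1 : ∀ l ∈ L, PySem.Chars.strip l = l := by
    intro l hl
    rw [hLdef] at hl
    obtain ⟨p, _, rfl⟩ := List.mem_map.mp hl
    exact pv_strip_idem p
  have hL2 : ∀ l ∈ L, '\n' ∉ l := by
    intro l hl hcin
    rw [hLdef, pv_splitOn_eq] at hl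
    obtain ⟨p, hp, rfl⟩ := List.mem_map.mp hl
    exact pv_not_mem_splitOn '\n' text.toList p hp ((pv_strip_sublist p).mem hcin)
  set M : List (List Char) :=
    ((L.dropWhile (·.isEmpty)).reverse.dropWhile (·.isEmpty)).reverse with hMdef
  have hA : pvDelBack (pvDelFront L) = M := by
    rw [pv_delFront_eq, pv_delBack_eq, hMdef]
  have hjoin : PySem.Chars.join ['\n'] L = ['\n'].intercalate L := rfl
  have hs : PySem.Chars.strip (PySem.Chars.join ['\n'] L) = ['\n'].intercalate M := by
    rw [hjoin, pv_strip_intercalate L hL1, hMdef]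
  rw [hA, hs]
  have hMsubL : ∀ l ∈ M, l ∈ L := by
    intro l hl
    rw [hMdef] at hl
    rw [List.mem_reverse] at hl
    have := (List.dropWhile_sublist _).mem hl
    rw [List.mem_reverse] at this
    exact (List.dropWhile_sublist _).mem this
  cases hM : M with
  | nil =>
    simp [List.intercalate]
  | cons m ms =>
    -- m is the head of L.dropWhile isEmpty, hence nonempty
    have hmne : m ≠ [] := by
      have hpre : M <+: L.dropWhile (·.isEmpty) := by
        rw [hMdef, ← List.reverse_suffix]
        simpa using List.dropWhile_suffix (l := (L.dropWhile (·.isEmpty)).reverse) _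
      rw [hM] at hpre
      obtain ⟨t, ht⟩ := hpre
      rcases hD : L.dropWhile (·.isEmpty) with _ | ⟨d, ds⟩
      · rw [hD] at ht; simp at ht
      · have hself : (d :: ds).dropWhile (·.isEmpty) = d :: ds := by
          rw [← hD]; exact List.dropWhile_idempotent ..
        have hd := List.dropWhile_eq_self_iff.mp hself (by simp)
        rw [hD] at ht
        simp only [List.cons_append] at ht
        injection ht with h1 h2
        subst h1
        simpa [List.isEmpty_iff] using hd
    have hsne : ['\n'].intercalate (m :: ms) ≠ [] := by
      cases ms with
      | nil => simpa [List.intercalate] using hmne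
      | cons q qs =>
        rw [pv_intercalate_cons_cons]
        simp
    rw [if_neg (by simpa [List.isEmpty_iff] using hsne)]
    have hsplit : PySem.Chars.splitOn (['\n'].intercalate (m :: ms)) ['\n'] = m :: ms := by
      rw [pv_splitOn_eq]
      refine List.splitOn_intercalate (m :: ms) '\n' ?_ (by simp)
      intro l hl
      exact hL2 l (hMsubL l (hM ▸ hl))
    rw [hsplit]
    rw [PySem.Chars.join, pv_join_nil_flatten]
    rw [PySem.List.foldl_append_eq_flatMap]
    simp [List.flatMap_def]

-- ===== VERDICT (by name: the statement is the Claim_ definition above) =====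
theorem formatCommentBlock_spec : Claim_equal_formatCommentBlock := by
  intro text _
  unfold Spec_formatCommentBlock formatCommentBlock formatCommentBlock_alt
  exact pv_main text
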